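-- pv_equiv track=rewrite | github.com/ValentinRapp/Advent-of-Code-2025 | day7/main.py | nb_timelines
-- ===== SOURCE A (Python) =====
-- def nb_timelines(grid: list[list[str]]):
--     splitters = [col for row in grid for col, x in enumerate(row) if x == '^']
--     entering = [1] + [0] * (len(splitters) - 1)
--     for i, si in enumerate(splitters):
--         for j, sj in enumerate(splitters[:i][::-1]):
--             if si == sj:
--                 break
--             if abs(si - sj) == 1:
--                 entering[i] += entering[i - j - 1]
--     return sum(entering) + 1
-- ===== SOURCE B (Python) =====
-- def nb_timelines(grid: list[list[str]]):
--     # One left-to-right pass: per-column running totals of beam counts plus a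
--     # snapshot of the adjacent-column totals taken at the previous splitter in
--     # the same column; each splitter's entering count is a difference of two sums.
--     totals = {}   # column -> sum of entering counts of splitters seen in that column
--     snap = {}     # column -> totals[c-1] + totals[c+1] as of the last splitter in column c
--     acc = 1       # entering count of the very first splitter (seeded as 1)
--     seeded = False
--     for row in grid:
--         for c, x in enumerate(row):
--             if x != '^':
--                 continue
--             cur = totals.get(c - 1, 0) + totals.get(c + 1, 0)
--             e = cur - snap.get(c, 0) if seeded else 1
--             if seeded:
--                 acc += e
--             seeded = True
--             snap[c] = cur
--             totals[c] = totals.get(c, 0) + e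
--     return acc + 1
-- ===== Notes on version B (the rewrite author's own statement) =====
-- stated objective: alternative
-- what changed: A rescans all earlier splitters backwards for every splitter; B makes a single left-to-right pass keeping per-column running totals plus a snapshot of the adjacent-column totals taken at the previous splitter in the same column, so each splitter's entering count is a difference of two maintained sums.
import Mathlib
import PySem

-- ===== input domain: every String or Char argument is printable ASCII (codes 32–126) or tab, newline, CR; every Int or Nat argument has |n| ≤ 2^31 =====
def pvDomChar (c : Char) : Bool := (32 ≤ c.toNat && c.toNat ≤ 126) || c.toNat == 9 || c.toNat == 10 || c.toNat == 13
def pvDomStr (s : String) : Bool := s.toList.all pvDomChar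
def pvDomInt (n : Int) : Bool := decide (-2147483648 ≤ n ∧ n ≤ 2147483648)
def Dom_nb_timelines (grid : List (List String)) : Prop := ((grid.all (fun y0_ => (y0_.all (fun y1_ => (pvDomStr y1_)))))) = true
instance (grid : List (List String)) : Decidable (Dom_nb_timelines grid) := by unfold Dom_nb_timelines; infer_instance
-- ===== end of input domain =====

-- B replaces A's per-splitter backward rescans by a single pass that keeps
-- per-column running totals and a snapshot taken at the previous same-column splitter.

-- ===== PORT A =====
-- splitters = [col for row in grid for col, x in enumerate(row) if x == '^']
def nbSplitters (grid : List (List String)) : List Int :=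
  grid.flatMap (fun row =>
    (PySem.List.enumerate row).filterMap (fun p => if p.2 = "^" then some p.1 else none))

-- inner loop: for j, sj in enumerate(splitters[:i][::-1]): break / entering[i] += entering[i-j-1]
def nbInner (si : Int) (i : Int) : List (Int × Int) → List Int → List Int
  | [], ent => ent
  | (j, sj) :: rest, ent =>
    if si = sj then ent
    else if (si - sj).natAbs = 1 then
      nbInner si i rest
        (PySem.List.pySetD ent i (PySem.List.pyGetD ent i 0 + PySem.List.pyGetD ent (i - j - 1) 0))
    else nbInner si i rest ent

-- outer loop: for i, si in enumerate(splitters): ...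
def nbOuter (splitters : List Int) : List (Int × Int) → List Int → List Int
  | [], ent => ent
  | (i, si) :: rest, ent =>
    nbOuter splitters rest
      (nbInner si i
        (PySem.List.enumerate
          ((PySem.List.slice? (PySem.List.slice splitters none (some i)) none none (-1)).getD []))
        ent)

def nb_timelines (grid : List (List String)) : Int :=
  let splitters := nbSplitters grid
  let entering : List Int := 1 :: List.replicate (splitters.length - 1) 0
  (nbOuter splitters (PySem.List.enumerate splitters) entering).sum + 1

-- ===== PORT B =====
-- body of the double loop of Source B (one grid cell)
def nbCell (st : PySem.Dict Int Int × PySem.Dict Int Int × Int × Bool) (p : Int × String) :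
    PySem.Dict Int Int × PySem.Dict Int Int × Int × Bool :=
  let (totals, snap, acc, seeded) := st
  if p.2 ≠ "^" then st
  else
    let c := p.1
    let cur := totals.getD (c - 1) 0 + totals.getD (c + 1) 0
    let e : Int := if seeded then cur - snap.getD c 0 else 1
    let acc' := if seeded then acc + e else acc
    (totals.insert c (totals.getD c 0 + e), snap.insert c cur, acc', true)

def nb_timelines_alt (grid : List (List String)) : Int :=
  let st := grid.foldl (fun st row => (PySem.List.enumerate row).foldl nbCell st)
    ((PySem.Dict.empty : PySem.Dict Int Int), (PySem.Dict.empty : PySem.Dict Int Int), (1 : Int), false)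
  st.2.2.1 + 1

-- ===== PRECONDITION & SPEC =====
def Spec_nb_timelines (grid : List (List String)) (out : Int) : Prop := out = nb_timelines_alt grid
instance (grid : List (List String)) (out : Int) : Decidable (Spec_nb_timelines grid out) := by unfold Spec_nb_timelines; infer_instance

-- ===== CLAIM (what is proved, stated in full; the proofs are below) =====
def Claim_equal_nb_timelines : Prop := ∀ (grid : List (List String)), Dom_nb_timelines grid → Spec_nb_timelines grid (nb_timelines grid)

-- ===== LEMMAS AND PROOFS =====

-- the splitter step of Source B on a bare column value
def bStep (st : PySem.Dict Int Int × PySem.Dict Int Int × Int × Bool) (c : Int) :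
    PySem.Dict Int Int × PySem.Dict Int Int × Int × Bool :=
  let (totals, snap, acc, seeded) := st
  let cur := totals.getD (c - 1) 0 + totals.getD (c + 1) 0
  let e : Int := if seeded then cur - snap.getD c 0 else 1
  let acc' := if seeded then acc + e else acc
  (totals.insert c (totals.getD c 0 + e), snap.insert c cur, acc', true)

-- abstract bookkeeping over the reversed list R of processed (column, entering) pairs
def sumAdj (c : Int) : List (Int × Int) → Int
  | [] => 0
  | (col, e) :: rest => if c = col then 0 else (if (c - col).natAbs = 1 then e else 0) + sumAdj c rest

def adjSum (c : Int) : List (Int × Int) → Int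
  | [] => 0
  | (col, e) :: rest => (if (c - col).natAbs = 1 then e else 0) + adjSum c rest

def colSum (d : Int) : List (Int × Int) → Int
  | [] => 0
  | (col, e) :: rest => (if col = d then e else 0) + colSum d rest

def snapSpec (c : Int) : List (Int × Int) → Int
  | [] => 0
  | (col, e) :: rest => if col = c then adjSum c rest else snapSpec c rest

def newE (c : Int) (R : List (Int × Int)) : Int := if R = [] then 1 else sumAdj c R

def buildR : List Int → List (Int × Int) → List (Int × Int)
  | [], R => R
  | c :: cs, R => buildR cs ((c, newE c R) :: R)

lemma adjSum_eq (c : Int) (R : List (Int × Int)) :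
    adjSum c R = colSum (c - 1) R + colSum (c + 1) R := by
  induction R with
  | nil => simp [adjSum, colSum]
  | cons p rest ih =>
    obtain ⟨col, e⟩ := p
    simp only [adjSum, colSum, ih]
    split_ifs <;> omega

lemma sumAdj_eq (c : Int) (R : List (Int × Int)) :
    sumAdj c R = adjSum c R - snapSpec c R := by
  induction R with
  | nil => simp [sumAdj, adjSum, snapSpec]
  | cons p rest ih =>
    obtain ⟨col, e⟩ := p
    by_cases h : c = col
    · subst h
      simp [sumAdj, adjSum, snapSpec]
    · have h' : ¬ col = c := fun hh => h hh.symm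
      simp only [sumAdj, adjSum, snapSpec, if_neg h, if_neg h', ih]
      ring

def InvB (R : List (Int × Int)) (st : PySem.Dict Int Int × PySem.Dict Int Int × Int × Bool) : Prop :=
  (∀ d, st.1.getD d 0 = colSum d R) ∧
  (∀ c, st.2.1.getD c 0 = snapSpec c R) ∧
  st.2.2.1 = (if R = [] then 1 else (R.map Prod.snd).sum) ∧
  st.2.2.2 = decide (R ≠ [])

lemma bStep_inv (R : List (Int × Int)) (st) (c : Int) (h : InvB R st) :
    InvB ((c, newE c R) :: R) (bStep st c) := by
  obtain ⟨totals, snap, acc, seeded⟩ := st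
  obtain ⟨ht, hs, ha, hd⟩ := h
  dsimp only at ht hs ha hd
  simp only [bStep]
  have hcur : totals.getD (c - 1) 0 + totals.getD (c + 1) 0 = adjSum c R := by
    rw [ht, ht, adjSum_eq]
  have he : (if seeded = true then totals.getD (c - 1) 0 + totals.getD (c + 1) 0 - snap.getD c 0 else 1)
      = newE c R := by
    rw [hcur, hs, hd, newE]
    by_cases hR : R = [] <;> simp [hR, sumAdj_eq]
  refine ⟨?_, ?_, ?_, by simp⟩
  · intro d
    dsimp only
    rw [PySem.Dict.getD_insert, he]
    by_cases hdc : d = c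
    · subst hdc
      simp [ht, colSum]
      ring
    · have hcd : ¬ c = d := fun hh => hdc hh.symm
      simp [hdc, hcd, ht, colSum]
  · intro c'
    dsimp only
    rw [PySem.Dict.getD_insert, hcur]
    by_cases hcc : c' = c
    · subst hcc
      simp [snapSpec]
    · have hcc' : ¬ c = c' := fun hh => hcc hh.symm
      simp [hcc, hcc', hs, snapSpec]
  · dsimp only
    rw [he]
    by_cases hR : R = []
    · subst hR
      have : seeded = false := by rw [hd]; simp
      subst this
      simp [ha, newE]
    · have hsd : seeded = true := by rw [hd]; simp [hR]
      subst hsd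
      simp [ha, hR]
      ring

lemma fold_inv (cs : List Int) : ∀ R st, InvB R st → InvB (buildR cs R) (cs.foldl bStep st) := by
  induction cs with
  | nil => intro R st h; simpa [buildR] using h
  | cons c rest ih =>
    intro R st h
    simpa [buildR, List.foldl_cons] using ih _ _ (bStep_inv R st c h)

-- reduce B's double cell loop to a fold of bStep over the splitter columns
lemma nbCell_eq (st) (p : Int × String) :
    nbCell st p = if p.2 = "^" then bStep st p.1 else st := by
  obtain ⟨totals, snap, acc, seeded⟩ := st
  by_cases h : p.2 = "^" <;> simp [nbCell, bStep, h]

lemma cellFold (L : List (Int × String)) : ∀ st,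
    L.foldl nbCell st
      = (L.filterMap (fun p => if p.2 = "^" then some p.1 else none)).foldl bStep st := by
  induction L with
  | nil => intro st; simp
  | cons p rest ih =>
    intro st
    by_cases h : p.2 = "^" <;> simp [List.filterMap_cons, h, nbCell_eq, ih]

lemma gridFold (grid : List (List String)) : ∀ st,
    grid.foldl (fun st row => (PySem.List.enumerate row).foldl nbCell st) st
      = (nbSplitters grid).foldl bStep st := by
  induction grid with
  | nil => intro st; simp [nbSplitters]
  | cons row rest ih =>
    intro st
    rw [List.foldl_cons, cellFold, ih]
    simp [nbSplitters, List.foldl_append]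

-- ===== A-side =====

def initEnt (n : Nat) : List Int := 1 :: List.replicate (n - 1) 0

def entV (S : List Int) (k : Nat) : List Int :=
  ((buildR (S.take k) []).reverse.map Prod.snd) ++ (initEnt S.length).drop k

lemma buildR_append (xs ys : List Int) : ∀ R, buildR (xs ++ ys) R = buildR ys (buildR xs R) := by
  induction xs with
  | nil => intro R; simp [buildR]
  | cons c cs ih => intro R; simp [buildR, ih]

lemma buildR_length (xs : List Int) : ∀ R, (buildR xs R).length = xs.length + R.length := by
  induction xs with
  | nil => intro R; simp [buildR]
  | cons c cs ih => intro R; simp [buildR, ih]; omega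

lemma buildR_fst (xs : List Int) : ∀ R, (buildR xs R).map Prod.fst = xs.reverse ++ R.map Prod.fst := by
  induction xs with
  | nil => intro R; simp [buildR]
  | cons c cs ih => intro R; simp [buildR, ih]

lemma set_append_len {α : Type} (xs : List α) (y : α) (ys : List α) (v : α) :
    (xs ++ y :: ys).set xs.length v = xs ++ v :: ys := by
  induction xs with
  | nil => simp
  | cons x xt ih => simp [List.set_cons_succ, ih]

-- inner loop collapses to a single write of the break-limited adjacent sum
lemma inner_spec (si : Int) (i : Nat) : ∀ (Rk : List (Int × Int)) (j0 : Nat) (ent : List Int),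
    i < ent.length →
    j0 + Rk.length ≤ i →
    (∀ (j : Nat) (hj : j < Rk.length),
        PySem.List.pyGetD ent ((i : Int) - ((j0 : Int) + (j : Int)) - 1) 0 = (Rk[j]).2) →
    nbInner si i (PySem.List.enumerate (Rk.map Prod.fst) j0) ent
      = PySem.List.pySetD ent (i : Int) (PySem.List.pyGetD ent (i : Int) 0 + sumAdj si Rk) := by
  intro Rk
  induction Rk with
  | nil =>
    intro j0 ent hi _ _
    simp only [List.map_nil, PySem.List.enumerate_nil, nbInner, sumAdj, add_zero,
      PySem.List.pySetD_natCast, PySem.List.pyGetD_natCast, List.getD_eq_getElem _ _ hi,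
      List.set_getElem_self]
  | cons p rest ih =>
    obtain ⟨col, e⟩ := p
    intro j0 ent hi hlen hread
    have hj0i : (j0 : Int) + (rest.length : Int) + 1 ≤ (i : Int) := by
      simp only [List.length_cons] at hlen; push_cast; omega
    rw [List.map_cons, PySem.List.enumerate_cons]
    by_cases hcol : si = col
    · simp only [nbInner, if_pos hcol, sumAdj, if_pos hcol, add_zero,
        PySem.List.pySetD_natCast, PySem.List.pyGetD_natCast, List.getD_eq_getElem _ _ hi,
        List.set_getElem_self]
    · have h0 := hread 0 (by simp)
      simp only [Int.natCast_zero, add_zero, List.getElem_cons_zero] at h0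
      by_cases hadj : (si - col).natAbs = 1
      · simp only [nbInner, if_neg hcol, if_pos hadj]
        rw [h0]
        set ent' := PySem.List.pySetD ent (i : Int) (PySem.List.pyGetD ent (i : Int) 0 + e) with hent'
        have hlen' : ent'.length = ent.length := by
          simp [hent', PySem.List.pySetD_natCast]
        have hcast : ((j0 : Int) + 1) = ((j0 + 1 : Nat) : Int) := by push_cast; ring
        rw [hcast]
        rw [ih (j0 + 1) ent' (by omega) (by simp only [List.length_cons] at hlen; omega) ?_]
        · have hgi : PySem.List.pyGetD ent' (i : Int) 0 = PySem.List.pyGetD ent (i : Int) 0 + e := by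
            rw [hent', PySem.List.pyGetD_pySetD_natCast ent i i _ 0 hi, if_pos rfl]
          rw [hgi, hent', PySem.List.pySetD_natCast, PySem.List.pySetD_natCast,
            PySem.List.pySetD_natCast, List.set_set]
          have : sumAdj si ((col, e) :: rest) = e + sumAdj si rest := by
            simp [sumAdj, hcol, hadj]
          rw [this]
          ring_nf
        · intro j hj
          have hm : (i : Int) - (((j0 + 1 : Nat) : Int) + (j : Int)) - 1
              = ((i - j0 - j - 2 : Nat) : Int) := by push_cast; omega
          rw [hent', hm, PySem.List.pyGetD_pySetD_natCast ent i (i - j0 - j - 2) _ 0 hi,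
            if_neg (by omega)]
          have := hread (j + 1) (by simp; omega)
          have hm2 : (i : Int) - ((j0 : Int) + ((j + 1 : Nat) : Int)) - 1
              = ((i - j0 - j - 2 : Nat) : Int) := by push_cast; omega
          rw [hm2] at this
          simpa using this
      · simp only [nbInner, if_neg hcol, if_neg hadj]
        have hcast : ((j0 : Int) + 1) = ((j0 + 1 : Nat) : Int) := by push_cast; ring
        rw [hcast]
        rw [ih (j0 + 1) ent (by omega) (by simp only [List.length_cons] at hlen; omega) ?_]
        · have : sumAdj si ((col, e) :: rest) = sumAdj si rest := by
            simp [sumAdj, hcol, hadj]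
          rw [this]
        · intro j hj
          have := hread (j + 1) (by simp; omega)
          have harg2 : (i : Int) - ((j0 : Int) + ((j + 1 : Nat) : Int)) - 1
              = (i : Int) - (((j0 + 1 : Nat) : Int) + (j : Int)) - 1 := by push_cast; ring
          rw [harg2] at this
          simpa using this

lemma stepEnt (S : List Int) (k : Nat) (hk : k < S.length) :
    PySem.List.pySetD (entV S k) (k : Int)
        (PySem.List.pyGetD (entV S k) (k : Int) 0 + sumAdj (S[k]) (buildR (S.take k) []))
      = entV S (k + 1) := by
  have hn1 : 1 ≤ S.length := by omega
  have hRlen : (buildR (S.take k) []).length = k := by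
    simp [buildR_length, List.length_take]; omega
  have hplen : ((buildR (S.take k) []).reverse.map Prod.snd).length = k := by simp [hRlen]
  have hIlen : (initEnt S.length).length = S.length := by simp [initEnt]; omega
  have hkI : k < (initEnt S.length).length := by omega
  have hdrop : (initEnt S.length).drop k
      = (initEnt S.length)[k] :: (initEnt S.length).drop (k + 1) :=
    (List.getElem_cons_drop hkI).symm
  have hread : PySem.List.pyGetD (entV S k) (k : Int) 0 = (initEnt S.length)[k] := by
    rw [PySem.List.pyGetD_natCast, entV,
      List.getD_append_right _ _ _ _ (by omega : ((buildR (S.take k) []).reverse.map Prod.snd).length ≤ k)]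
    rw [hplen, Nat.sub_self, hdrop]
    rfl
  have hval : (initEnt S.length)[k] + sumAdj (S[k]) (buildR (S.take k) [])
      = newE (S[k]) (buildR (S.take k) []) := by
    rcases Nat.eq_zero_or_pos k with h0 | hpos
    · subst h0
      simp [initEnt, newE, sumAdj, buildR]
    · obtain ⟨k', rfl⟩ : ∃ k', k = k' + 1 := ⟨k - 1, by omega⟩
      have hz : (initEnt S.length)[k' + 1] = 0 := by
        simp [initEnt]
      have hRne : buildR (S.take (k' + 1)) [] ≠ [] := by
        intro hh; rw [hh] at hRlen; simp at hRlen
      simp [hz, newE, hRne]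
  rw [hread, hval, PySem.List.pySetD_natCast]
  have hset : ∀ v : Int, (entV S k).set k v
      = ((buildR (S.take k) []).reverse.map Prod.snd) ++ v :: (initEnt S.length).drop (k + 1) := by
    intro v
    rw [entV, hdrop]
    have h2 := set_append_len ((buildR (S.take k) []).reverse.map Prod.snd)
      ((initEnt S.length)[k]) ((initEnt S.length).drop (k + 1)) v
    rw [hplen] at h2
    exact h2
  rw [hset]
  have htake : S.take (k + 1) = S.take k ++ [S[k]] := List.take_succ_eq_append_getElem hk
  rw [entV, htake, buildR_append]
  simp [buildR]

lemma entV_length (S : List Int) (k : Nat) (hk : k ≤ S.length) (hne : S ≠ []) :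
    (entV S k).length = S.length := by
  have hn : 1 ≤ S.length := List.length_pos_of_ne_nil hne
  simp [entV, buildR_length, initEnt, List.length_take]
  omega

lemma entV_read (S : List Int) (k : Nat) (hk : k ≤ S.length) (hne : S ≠ []) (j : Nat) (hj : j < k) :
    PySem.List.pyGetD (entV S k) ((k : Int) - ((0 : Int) + (j : Int)) - 1) 0
      = ((buildR (S.take k) [])[j]'(by simp [buildR_length]; omega)).2 := by
  have hRlen : (buildR (S.take k) []).length = k := by
    simp [buildR_length, List.length_take]; omega
  have hplen : ((buildR (S.take k) []).reverse.map Prod.snd).length = k := by simp [hRlen]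
  have hm : (k : Int) - ((0 : Int) + (j : Int)) - 1 = ((k - j - 1 : Nat) : Int) := by
    push_cast; omega
  rw [hm, PySem.List.pyGetD_natCast, entV,
    List.getD_append _ _ _ _ (by rw [hplen]; omega :
      k - j - 1 < ((buildR (S.take k) []).reverse.map Prod.snd).length),
    List.getD_eq_getElem _ _ (by rw [hplen]; omega)]
  rw [List.getElem_map, List.getElem_reverse]
  simp [show (buildR (S.take k) []).length - 1 - (k - j - 1) = j from by rw [hRlen]; omega]

lemma outer_inv (S : List Int) (hne : S ≠ []) : ∀ (m k : Nat), k + m = S.length →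
    nbOuter S (PySem.List.enumerate (S.drop k) (k : Int)) (entV S k) = entV S S.length := by
  intro m
  induction m with
  | zero =>
    intro k hk
    have hd : S.drop k = [] := List.drop_eq_nil_of_le (by omega)
    rw [hd, PySem.List.enumerate_nil]
    rw [show k = S.length from by omega]
    rfl
  | succ m ih =>
    intro k hk
    have hklt : k < S.length := by omega
    have hn1 : 1 ≤ S.length := by omega
    have hRlen : (buildR (S.take k) []).length = k := by
      simp [buildR_length, List.length_take]; omega
    have hdrop : S.drop k = S[k] :: S.drop (k + 1) := (List.getElem_cons_drop hklt).symm
    rw [hdrop, PySem.List.enumerate_cons]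
    simp only [nbOuter]
    rw [PySem.List.slice_to_natCast, PySem.List.slice?_none_none_neg_one, Option.getD_some]
    have hfst : (S.take k).reverse = (buildR (S.take k) []).map Prod.fst := by
      rw [buildR_fst]; simp
    rw [hfst]
    have hinner := inner_spec (S[k]) k (buildR (S.take k) []) 0 (entV S k)
      (by rw [entV_length S k (by omega) hne]; omega)
      (by omega)
      (by
        intro j hj
        exact entV_read S k (by omega) hne j (by omega))
    simp only [Int.natCast_zero] at hinner
    rw [hinner, stepEnt S k hklt]
    rw [show ((k : Int) + 1) = ((k + 1 : Nat) : Int) from by push_cast; ring]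
    exact ih (k + 1) (by omega)

def ANS (S : List Int) : Int :=
  (if buildR S [] = [] then 1 else ((buildR S []).map Prod.snd).sum) + 1

lemma a_eq (grid : List (List String)) : nb_timelines grid = ANS (nbSplitters grid) := by
  unfold nb_timelines ANS
  by_cases hS : nbSplitters grid = []
  · rw [hS]
    simp [nbOuter, buildR, PySem.List.enumerate_nil]
  · set S := nbSplitters grid with hSdef
    have hn1 : 1 ≤ S.length := List.length_pos_of_ne_nil hS
    have h := outer_inv S hS S.length 0 (by omega)
    simp only [List.drop_zero, Int.natCast_zero] at h
    have h0 : entV S 0 = 1 :: List.replicate (S.length - 1) (0 : Int) := by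
      simp [entV, buildR, initEnt]
    rw [h0] at h
    dsimp only
    rw [h]
    have hIlen : (initEnt S.length).length = S.length := by simp [initEnt]; omega
    have hfin : entV S S.length = (buildR S []).reverse.map Prod.snd := by
      rw [entV, List.take_length, List.drop_eq_nil_of_le (by omega), List.append_nil]
    rw [hfin]
    have hRne : buildR S [] ≠ [] := by
      intro hh
      have := buildR_length S []
      rw [hh] at this; simp at this; omega
    rw [if_neg hRne]
    rw [List.map_reverse, List.sum_reverse]

lemma b_eq (grid : List (List String)) : nb_timelines_alt grid = ANS (nbSplitters grid) := by
  have h0 : InvB [] ((PySem.Dict.empty : PySem.Dict Int Int),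
      (PySem.Dict.empty : PySem.Dict Int Int), (1 : Int), false) := by
    refine ⟨?_, ?_, ?_, ?_⟩ <;> simp [PySem.Dict.getD_empty, colSum, snapSpec]
  have h := (fold_inv (nbSplitters grid) [] _ h0).2.2.1
  unfold nb_timelines_alt ANS
  dsimp only
  rw [gridFold, h]

-- ===== VERDICT (by name: the statement is the Claim_ definition above) =====
theorem nb_timelines_spec : Claim_equal_nb_timelines := by
  intro grid _
  unfold Spec_nb_timelines
  rw [a_eq, b_eq]
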